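-- pv_equiv track=rewrite | github.com/yasutoshijp/pico_w | 03_DHT11_send_to_ss_script.py | parse_raw_timings
-- ===== SOURCE A (Python) =====
-- def parse_raw_timings(timings):
--     """生データから温度・湿度を計算"""
--     if not timings or len(timings) < 40:
--         return None, None
--
--     # データビットの解析
--     bits = []
--     for i in range(0, len(timings)-1, 2):
--         # 26-28μsがビット"0"、70μsがビット"1"
--         if 60 <= timings[i+1] <= 80:
--             bits.append(1)
--         else:
--             bits.append(0)
--
--     # バイトに変換
--     bytes_data = []
--     for i in range(0, len(bits), 8):
--         byte = 0
--         for j in range(8):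
--             if i+j < len(bits):
--                 byte = (byte << 1) | bits[i+j]
--         bytes_data.append(byte)
--
--     if len(bytes_data) >= 4:
--         raw_humidity = bytes_data[0]
--         raw_temperature = bytes_data[2]
--         return raw_temperature, raw_humidity
--     return None, None
-- ===== SOURCE B (Python) =====
-- def parse_raw_timings(timings):
--     """生データから温度・湿度を計算"""
--     if not timings or len(timings) < 40:
--         return None, None
--     # single pass: fold each bit straight into a running byte accumulator
--     bytes_data = []
--     cur = 0
--     count = 0
--     for i in range(0, len(timings) - 1, 2):
--         bit = 1 if 60 <= timings[i + 1] <= 80 else 0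
--         cur = cur * 2 + bit
--         count += 1
--         if count == 8:
--             bytes_data.append(cur)
--             cur = 0
--             count = 0
--     if count > 0:
--         bytes_data.append(cur)
--     if len(bytes_data) >= 4:
--         return bytes_data[2], bytes_data[0]
--     return None, None
-- ===== Notes on version B (the rewrite author's own statement) =====
-- stated objective: simpler
-- what changed: Replaces A's two-stage pipeline (build an intermediate bits list, then re-scan it in chunks of 8 with a guarded inner byte loop) by a single pass over the timings that folds each bit directly into a running byte accumulator, flushing every 8 bits and appending the unpadded remainder.
import Mathlib
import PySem

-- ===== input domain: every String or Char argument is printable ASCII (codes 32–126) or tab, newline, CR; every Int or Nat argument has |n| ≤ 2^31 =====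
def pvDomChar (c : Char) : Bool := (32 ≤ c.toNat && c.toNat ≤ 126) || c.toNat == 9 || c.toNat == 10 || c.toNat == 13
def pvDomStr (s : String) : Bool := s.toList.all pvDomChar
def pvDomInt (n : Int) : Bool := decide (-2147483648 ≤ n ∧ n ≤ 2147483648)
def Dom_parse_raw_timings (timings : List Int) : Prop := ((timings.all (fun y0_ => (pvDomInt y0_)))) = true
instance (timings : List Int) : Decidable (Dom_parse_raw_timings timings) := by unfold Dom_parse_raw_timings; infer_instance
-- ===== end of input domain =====

-- B merges A's bits-list stage and byte-chunking stage into one fold with a running byte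
-- accumulator (objective: simpler, one pass instead of two).
-- In both ports '(byte << 1) | bit' is ported as 'byte * 2 + bit', exact here since byte ≥ 0 and bit ∈ {0,1}.

-- helpers shared by the ports: the bit test, A's inner byte loop, B's loop step and finalizer
def pvStep (st : List Int × Int × Int) (b : Int) : List Int × Int × Int :=
  let cur := st.2.1 * 2 + b
  let count := st.2.2 + 1
  if count = 8 then (st.1 ++ [cur], 0, 0) else (st.1, cur, count)

def pvFin (s : List Int × Int × Int) : List Int := if 0 < s.2.2 then s.1 ++ [s.2.1] else s.1

def pvInner (L : List Int) (i : Int) : Int :=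
  (PySem.List.pyRange 0 8 1).foldl
    (fun byte j => if i + j < (L.length : Int) then byte * 2 + PySem.List.pyGetD L (i + j) 0 else byte) 0

def pvBitF (timings : List Int) (i : Int) : Int :=
  if 60 ≤ PySem.List.pyGetD timings (i + 1) 0 ∧ PySem.List.pyGetD timings (i + 1) 0 ≤ 80 then 1 else 0

-- ===== PORT A =====
def parse_raw_timings (timings : List Int) : Option Int × Option Int :=
  if timings = [] ∨ (timings.length : Int) < 40 then (none, none)
  else
    -- bits[] loop over range(0, len(timings)-1, 2); timings[i+1] is always in range here
    let bits : List Int :=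
      (PySem.List.pyRange 0 ((timings.length : Int) - 1) 2).foldl
        (fun acc i => acc ++ [pvBitF timings i]) []
    -- bytes_data[] loop over range(0, len(bits), 8); pvInner is the guarded inner loop over range(8)
    let bytes_data : List Int :=
      (PySem.List.pyRange 0 (bits.length : Int) 8).foldl
        (fun acc i => acc ++ [pvInner bits i]) []
    if 4 ≤ (bytes_data.length : Int) then
      (some (PySem.List.pyGetD bytes_data 2 0), some (PySem.List.pyGetD bytes_data 0 0))
    else (none, none)

-- ===== PORT B =====
def parse_raw_timings_alt (timings : List Int) : Option Int × Option Int :=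
  if timings = [] ∨ (timings.length : Int) < 40 then (none, none)
  else
    -- single pass: state = (bytes_data, cur, count); pvStep folds one bit into the state
    let s : List Int × Int × Int :=
      (PySem.List.pyRange 0 ((timings.length : Int) - 1) 2).foldl
        (fun st i => pvStep st (pvBitF timings i)) ([], 0, 0)
    -- if count > 0: append the unpadded trailing byte
    let bytes_data : List Int := pvFin s
    if 4 ≤ (bytes_data.length : Int) then
      (some (PySem.List.pyGetD bytes_data 2 0), some (PySem.List.pyGetD bytes_data 0 0))
    else (none, none)

-- ===== PRECONDITION & SPEC =====
def Spec_parse_raw_timings (timings : List Int) (out : Option Int × Option Int) : Prop := out = parse_raw_timings_alt timings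
instance (timings : List Int) (out : Option Int × Option Int) : Decidable (Spec_parse_raw_timings timings out) := by unfold Spec_parse_raw_timings; infer_instance

-- ===== CLAIM (what is proved, stated in full; the proofs are below) =====
def Claim_equal_parse_raw_timings : Prop := ∀ (timings : List Int), Dom_parse_raw_timings timings → Spec_parse_raw_timings timings (parse_raw_timings timings)

-- ===== LEMMAS AND PROOFS =====

-- value of a bit list read MSB-first
def pvVal (l : List Int) : Int := l.foldl (fun a b => a * 2 + b) 0

-- bs split into chunks of 8 (last chunk possibly shorter)
def pvChunk8 (bs : List Int) : List (List Int) :=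
  if h : bs = [] then [] else bs.take 8 :: pvChunk8 (bs.drop 8)
termination_by bs.length
decreasing_by simp [List.length_drop]; exact Nat.pos_of_ne_zero (by simpa [List.length_eq_zero_iff] using h)

theorem pvChunk8_nil : pvChunk8 [] = [] := by simp [pvChunk8]

theorem pvChunk8_ne (bs : List Int) (h : bs ≠ []) :
    pvChunk8 bs = bs.take 8 :: pvChunk8 (bs.drop 8) := by
  rw [pvChunk8]; simp [h]

theorem pvChunk8_small (bs : List Int) (h : bs ≠ []) (hl : bs.length ≤ 8) :
    pvChunk8 bs = [bs] := by
  rw [pvChunk8_ne bs h, List.take_of_length_le hl, List.drop_eq_nil_of_le hl, pvChunk8_nil]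

theorem pvChunk8_cons8 (c r : List Int) (hc : c.length = 8) :
    pvChunk8 (c ++ r) = c :: pvChunk8 r := by
  have hne : c ++ r ≠ [] := by
    intro h; have := congrArg List.length h; simp [hc] at this
  rw [pvChunk8_ne _ hne]
  rw [List.take_append_of_le_length (by omega), List.drop_append_of_le_length (by omega)]
  rw [List.take_of_length_le (le_of_eq hc), List.drop_eq_nil_of_le (le_of_eq hc)]
  simp

theorem pvVal_append_singleton (l : List Int) (b : Int) :
    pvVal (l ++ [b]) = pvVal l * 2 + b := by
  simp [pvVal]

-- induction forms for a step-8 range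
theorem pvRange8_nil (a b : Int) (h : b ≤ a) : PySem.List.pyRange a b 8 = [] := by
  rw [PySem.List.pyRange_of_pos a b (by norm_num)]
  have : ¬ a < b := by omega
  simp [this]

theorem pvRange8_cons (a b : Int) (h : a < b) :
    PySem.List.pyRange a b 8 = a :: PySem.List.pyRange (a + 8) b 8 := by
  rw [PySem.List.pyRange_of_pos a b (by norm_num), PySem.List.pyRange_of_pos (a+8) b (by norm_num)]
  have hc : ((b - a + 8 - 1) / 8).toNat
      = (if a + 8 < b then ((b - (a+8) + 8 - 1) / 8).toNat else 0) + 1 := by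
    split_ifs <;> omega
  rw [if_pos h, hc, List.range_succ_eq_map]
  simp only [List.map_cons, List.map_map, Nat.cast_zero, mul_zero, add_zero]
  congr 1
  apply List.map_congr_left
  intro k _
  simp [Function.comp]
  ring


theorem pvRange018 : PySem.List.pyRange 0 8 1 = [0, 1, 2, 3, 4, 5, 6, 7] := by decide

set_option maxHeartbeats 1600000 in
theorem pvInner_eq (L : List Int) (p : Nat) (hp : p ≤ L.length) :
    pvInner L (p : Int) = pvVal ((L.drop p).take 8) := by
  have hget : ∀ j : Nat, PySem.List.pyGetD L ((p : Int) + (j : Int)) 0 = (L.drop p).getD j 0 := by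
    intro j
    rw [show (p : Int) + (j : Int) = ((p + j : Nat) : Int) by push_cast; ring,
      PySem.List.pyGetD_natCast]
    simp [List.getD_eq_getElem?_getD, List.getElem?_drop]
  rw [pvInner, pvRange018]
  have h0 := hget 0; have h1 := hget 1; have h2 := hget 2; have h3 := hget 3
  have h4 := hget 4; have h5 := hget 5; have h6 := hget 6; have h7 := hget 7
  push_cast at h0 h1 h2 h3 h4 h5 h6 h7
  obtain ⟨bs, hbs⟩ : ∃ bs, L.drop p = bs := ⟨_, rfl⟩
  have hLb : (L.length : Int) = (p : Int) + (bs.length : Int) := by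
    have : bs.length = L.length - p := by rw [← hbs]; simp
    omega
  rw [hbs] at h0 h1 h2 h3 h4 h5 h6 h7
  simp only [List.foldl_cons, List.foldl_nil, add_zero, h0, h1, h2, h3, h4, h5, h6, h7, hbs, hLb]
  rcases bs with _ | ⟨b0, _ | ⟨b1, _ | ⟨b2, _ | ⟨b3, _ | ⟨b4, _ | ⟨b5, _ | ⟨b6, _ | ⟨b7, rest⟩⟩⟩⟩⟩⟩⟩⟩ <;>
    norm_num [pvVal]
  case cons.cons.cons.cons.cons.cons.cons.cons =>
    simp only [show ((7:Int) ≤ (rest.length : Int) + 1 + 1 + 1 + 1 + 1 + 1 + 1) = True from eq_true (by omega),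
      show ((6:Int) ≤ (rest.length : Int) + 1 + 1 + 1 + 1 + 1 + 1 + 1) = True from eq_true (by omega),
      show ((5:Int) ≤ (rest.length : Int) + 1 + 1 + 1 + 1 + 1 + 1 + 1) = True from eq_true (by omega),
      show ((4:Int) ≤ (rest.length : Int) + 1 + 1 + 1 + 1 + 1 + 1 + 1) = True from eq_true (by omega),
      show ((3:Int) ≤ (rest.length : Int) + 1 + 1 + 1 + 1 + 1 + 1 + 1) = True from eq_true (by omega),
      show ((2:Int) ≤ (rest.length : Int) + 1 + 1 + 1 + 1 + 1 + 1 + 1) = True from eq_true (by omega),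
      show ((0:Int) ≤ (rest.length : Int) + 1 + 1 + 1 + 1 + 1 + 1) = True from eq_true (by omega),
      show ((0:Int) ≤ (rest.length : Int) + 1 + 1 + 1 + 1 + 1 + 1 + 1) = True from eq_true (by omega),
      if_true]
    have hL0 := congrArg (fun l => l[0]?) hbs
    simp only [List.getElem?_drop, Nat.add_zero] at hL0
    rw [hL0]
    simp only [List.getElem?_cons_zero, Option.getD_some]
  all_goals (
    have hL0 := congrArg (fun l => l[0]?) hbs
    simp only [List.getElem?_drop, Nat.add_zero] at hL0
    rw [hL0]
    simp only [List.getElem?_cons_zero, Option.getD_some])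

theorem pvA_chunks : ∀ (n : Nat) (bs pre L : List Int), L = pre ++ bs → bs.length ≤ n →
    (PySem.List.pyRange (pre.length : Int) ((pre.length : Int) + (bs.length : Int)) 8).map (pvInner L)
      = (pvChunk8 bs).map pvVal := by
  intro n
  induction n with
  | zero =>
    intro bs pre L hL hn
    have hbs : bs = [] := by simpa [List.length_eq_zero_iff] using Nat.le_zero.mp hn
    subst hbs
    rw [pvRange8_nil _ _ (by simp), pvChunk8_nil]
    simp
  | succ n ih =>
    intro bs pre L hL hn
    by_cases hbs : bs = []
    · subst hbs
      rw [pvRange8_nil _ _ (by simp), pvChunk8_nil]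
      simp
    · have hlen : 0 < bs.length := List.length_pos_iff.2 hbs
      rw [pvRange8_cons _ _ (by omega), List.map_cons, pvChunk8_ne bs hbs, List.map_cons]
      have hhead : pvInner L (pre.length : Int) = pvVal (bs.take 8) := by
        rw [hL, pvInner_eq (pre ++ bs) pre.length (by simp)]
        simp
      rw [hhead]
      congr 1
      by_cases h8 : bs.length ≤ 8
      · rw [List.drop_eq_nil_of_le h8, pvChunk8_nil,
          pvRange8_nil _ _ (by omega)]
        simp
      · have hpre' : ((pre ++ bs.take 8).length : Int) = (pre.length : Int) + 8 := by
          simp; omega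
        have hdrop : ((bs.drop 8).length : Int) = (bs.length : Int) - 8 := by
          simp; omega
        have := ih (bs.drop 8) (pre ++ bs.take 8) L
          (by rw [hL, List.append_assoc, List.take_append_drop])
          (by simp; omega)
        rw [hpre', hdrop] at this
        rw [show (pre.length : Int) + 8 + ((bs.length : Int) - 8) = (pre.length : Int) + (bs.length : Int) by ring] at this
        exact this

theorem pvB_main (bs : List Int) : ∀ (p B : List Int), p.length < 8 →
    pvFin (bs.foldl pvStep (B, pvVal p, (p.length : Int))) = B ++ (pvChunk8 (p ++ bs)).map pvVal := by
  induction bs with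
  | nil =>
    intro p B hp
    by_cases hpn : p = []
    · subst hpn; simp [pvFin, pvChunk8_nil, pvVal]
    · have hpl : (0 : Int) < (p.length : Int) := by
        have := List.length_pos_iff.2 hpn; omega
      simp only [List.foldl_nil, pvFin, if_pos hpl, List.append_nil]
      rw [pvChunk8_small p hpn (by omega)]
      simp
  | cons b bs ih =>
    intro p B hp
    rw [List.foldl_cons]
    by_cases h7 : p.length = 7
    · have hstep : pvStep (B, pvVal p, (p.length : Int)) b = (B ++ [pvVal (p ++ [b])], 0, 0) := by
        simp [pvStep, h7, pvVal_append_singleton]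
      rw [hstep]
      have h0 := ih [] (B ++ [pvVal (p ++ [b])]) (by simp)
      simp only [show pvVal ([] : List Int) = (0 : Int) from rfl, List.length_nil, Nat.cast_zero,
        List.nil_append] at h0
      rw [h0, show p ++ b :: bs = (p ++ [b]) ++ bs by simp,
        pvChunk8_cons8 (p ++ [b]) bs (by simp [h7])]
      simp
    · have hstep : pvStep (B, pvVal p, (p.length : Int)) b
          = (B, pvVal (p ++ [b]), ((p ++ [b]).length : Int)) := by
        simp only [pvStep, pvVal_append_singleton]
        rw [if_neg (by omega : ¬ ((p.length : Int) + 1 = 8))]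
        simp
      rw [hstep, ih (p ++ [b]) B (by simp; omega)]
      rw [show (p ++ [b]) ++ bs = p ++ b :: bs by simp]
-- ===== VERDICT (by name: the statement is the Claim_ definition above) =====
theorem parse_raw_timings_spec : Claim_equal_parse_raw_timings := by
  intro timings _
  unfold Spec_parse_raw_timings parse_raw_timings parse_raw_timings_alt
  by_cases hg : timings = [] ∨ (timings.length : Int) < 40
  · simp only [if_pos hg]
  · simp only [if_neg hg]
    have hbits :
        (PySem.List.pyRange 0 ((timings.length : Int) - 1) 2).foldl
          (fun acc i => acc ++ [pvBitF timings i]) []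
          = (PySem.List.pyRange 0 ((timings.length : Int) - 1) 2).map (pvBitF timings) := by
      rw [PySem.List.foldl_append_singleton_eq_map]
      rw [List.nil_append]
    rw [hbits]
    have hB :
        (PySem.List.pyRange 0 ((timings.length : Int) - 1) 2).foldl
          (fun st i => pvStep st (pvBitF timings i)) (([] : List Int), (0 : Int), (0 : Int))
          = ((PySem.List.pyRange 0 ((timings.length : Int) - 1) 2).map (pvBitF timings)).foldl
              pvStep (([] : List Int), (0 : Int), (0 : Int)) :=
      List.foldl_map.symm
    rw [hB]
    generalize ((PySem.List.pyRange 0 ((timings.length : Int) - 1) 2).map (pvBitF timings)) = bs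
    have hA :
        (PySem.List.pyRange 0 (bs.length : Int) 8).foldl
          (fun acc i => acc ++ [pvInner bs i]) []
          = (pvChunk8 bs).map pvVal := by
      rw [PySem.List.foldl_append_singleton_eq_map, List.nil_append]
      have hAC := pvA_chunks bs.length bs [] bs (by simp) (le_refl _)
      simp only [List.length_nil, Nat.cast_zero, zero_add] at hAC
      exact hAC
    have hBC : pvFin (bs.foldl pvStep (([] : List Int), (0 : Int), (0 : Int)))
        = (pvChunk8 bs).map pvVal := by
      have h := pvB_main bs [] [] (by simp)
      simp only [show pvVal ([] : List Int) = (0 : Int) from rfl, List.length_nil, Nat.cast_zero,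
        List.nil_append] at h
      exact h
    rw [hA, hBC]
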